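-- pv_equiv track=rewrite | github.com/Middle1204/CT | PYTHON/B2476.py | calculate_prize
-- ===== SOURCE A (Python) =====
-- def calculate_prize(rd):
--     rd_set = set(rd)
--
--     if len(rd_set) == 1:
--         return 10000 + (rd[0] * 1000)
--     elif len(rd_set) == 2:
--         for num in rd_set:
--             if rd.count(num) == 2:
--                 return 1000 + (num * 100)
--     else:
--         return max(rd) * 100
-- ===== SOURCE B (Python) =====
-- def calculate_prize(rd):
--     s = sorted(rd)
--     runs = []
--     i = 0
--     while i < len(s):
--         j = i
--         while j < len(s) and s[j] == s[i]:
--             j += 1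
--         runs.append((s[i], j - i))
--         i = j
--     if len(runs) == 1:
--         return 10000 + s[0] * 1000
--     elif len(runs) == 2:
--         for v, c in runs:
--             if c == 2:
--                 return 1000 + v * 100
--     else:
--         return s[-1] * 100
-- ===== Notes on version B (the rewrite author's own statement) =====
-- stated objective: alternative
-- what changed: B sorts the dice and run-length-encodes the sorted list with an index scan, reading the answer off the runs (one run = all equal, two runs = pick the run of length 2, else the last sorted element is the max), instead of A's set() construction with rd.count() rescans and max().
-- outside the precondition, e.g. on calculate_prize([-20, -20, -16, -16]): A returns -600, B returns -1000; on calculate_prize([1, 1, 1, 2, 2, 2]): A returns None, B returns None; on calculate_prize([]): A raises ValueError, B raises IndexError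
import Mathlib
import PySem

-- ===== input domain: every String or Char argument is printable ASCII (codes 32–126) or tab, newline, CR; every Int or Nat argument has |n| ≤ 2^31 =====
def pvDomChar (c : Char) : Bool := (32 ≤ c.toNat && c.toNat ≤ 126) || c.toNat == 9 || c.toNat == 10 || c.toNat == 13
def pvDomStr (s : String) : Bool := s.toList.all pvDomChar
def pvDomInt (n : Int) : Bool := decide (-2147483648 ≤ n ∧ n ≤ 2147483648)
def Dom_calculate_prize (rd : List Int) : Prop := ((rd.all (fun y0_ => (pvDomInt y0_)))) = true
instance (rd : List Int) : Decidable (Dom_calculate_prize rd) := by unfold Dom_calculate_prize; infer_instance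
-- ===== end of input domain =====

-- B sorts the dice and run-length-encodes the sorted list, reading the answer off the runs,
-- instead of A's set() construction with rd.count() rescans and max(); same cost class (no speed claim).

-- ===== PORT A =====
-- set(rd) ported as PySem.Set.ofList (first-occurrence order); inside Pre_ the len==2 branch has a
-- unique count-2 value, so the set iteration order cannot matter. Where Python A returns None
-- (len==2 loop falls through) the port returns 0, and where max([]) raises it returns 0 — both outside Pre_.
def calculate_prize (rd : List Int) : Int :=
  let rd_set : PySem.Set Int := PySem.Set.ofList rd
  if rd_set.length = 1 then
    10000 + (PySem.List.pyGet? rd 0).getD 0 * 1000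
  else if rd_set.length = 2 then
    match rd_set.find? (fun num => PySem.List.count rd num == 2) with
    | some num => 1000 + num * 100
    | none => 0
  else
    (PySem.List.max? rd (fun x => x)).getD 0 * 100

-- ===== PORT B =====
-- the run-length scan of Source B: the inner 'while s[j] == s[i]' advance is the takeWhile/dropWhile
-- split of the remaining suffix, the outer while-loop is recursion on that suffix.
def pvRuns : List Int → List (Int × Int)
  | [] => []
  | x :: t =>
    let pre := t.takeWhile (fun y => y == x)
    let rest := t.dropWhile (fun y => y == x)
    (x, (pre.length : Int) + 1) :: pvRuns rest
  termination_by s => s.length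
  decreasing_by
    simp only [List.length_cons]
    exact Nat.lt_succ_of_le (List.length_dropWhile_le _ _)

-- literal port of Source B: sort, run-length-encode, branch on the number of runs; where Python B
-- raises (s[-1] on the empty list) or falls through to None this port returns 0, outside Pre_.
def calculate_prize_alt (rd : List Int) : Int :=
  let s := PySem.List.sorted rd (fun x => x) false
  let runs := pvRuns s
  if runs.length = 1 then
    10000 + (PySem.List.pyGet? s 0).getD 0 * 1000
  else if runs.length = 2 then
    match runs.find? (fun vc => vc.2 == 2) with
    | some vc => 1000 + vc.1 * 100
    | none => 0
  else
    (PySem.List.pyGet? s (-1)).getD 0 * 100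

-- ===== PRECONDITION & SPEC =====
-- Pre_ excludes the inputs on which A does not return an int of its own (empty list: ValueError from
-- max([]); exactly two distinct values but none occurring exactly twice: the loop falls through and A
-- returns None) and the tie corner with two distinct values BOTH occurring twice, where A's answer is
-- an accident of CPython's set iteration order.
def Pre_calculate_prize (rd : List Int) : Prop :=
  rd ≠ [] ∧ ((PySem.List.dedup rd).length = 2 →
    ((PySem.List.dedup rd).filter (fun v => rd.count v == 2)).length = 1)
instance (rd : List Int) : Decidable (Pre_calculate_prize rd) := by unfold Pre_calculate_prize; infer_instance
def pvWitness_calculate_prize : List Int := [3, 3, 5]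
def Spec_calculate_prize (rd : List Int) (out : Int) : Prop := out = calculate_prize_alt rd
instance (rd : List Int) (out : Int) : Decidable (Spec_calculate_prize rd out) := by unfold Spec_calculate_prize; infer_instance

-- ===== CLAIM (what is proved, stated in full; the proofs are below) =====
def Claim_equal_calculate_prize : Prop := ∀ (rd : List Int), Dom_calculate_prize rd → Pre_calculate_prize rd → Spec_calculate_prize rd (calculate_prize rd)

-- ===== LEMMAS AND PROOFS =====

-- the run heads of pvRuns s are exactly the values occurring in s
theorem pv_mem_fst_pvRuns (s : List Int) (v : Int) :
    v ∈ (pvRuns s).map Prod.fst ↔ v ∈ s := by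
  induction s using pvRuns.induct with
  | case1 => simp [pvRuns]
  | case2 x t rest ih0 =>
    have ih : v ∈ (pvRuns (t.dropWhile (fun y => y == x))).map Prod.fst ↔ v ∈ t.dropWhile (fun y => y == x) := ih0
    have hsplit : t.takeWhile (fun y => y == x) ++ t.dropWhile (fun y => y == x) = t :=
      List.takeWhile_append_dropWhile
    have hpre : ∀ y ∈ t.takeWhile (fun y => y == x), y = x := by
      intro y hy
      simpa using List.mem_takeWhile_imp hy
    constructor
    · intro h
      simp only [pvRuns, List.map_cons, List.mem_cons] at h
      rcases h with h | h
      · simp [h]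
      · have hv : v ∈ t.dropWhile (fun y => y == x) := ih.mp h
        have : v ∈ t := by rw [← hsplit]; exact List.mem_append_right _ hv
        simp [this]
    · intro h
      simp only [pvRuns, List.map_cons, List.mem_cons]
      rcases List.mem_cons.mp h with h | h
      · exact Or.inl h
      · rw [← hsplit] at h
        rcases List.mem_append.mp h with h | h
        · exact Or.inl (hpre v h)
        · exact Or.inr (ih.mpr h)

-- on a sorted list every element of the dropped suffix is strictly above the head
theorem pv_rest_gt (x : Int) (t : List Int) (hs : (x :: t).Pairwise (· ≤ ·)) :
    ∀ y ∈ t.dropWhile (fun y => y == x), x < y := by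
  intro y hy
  have hle : ∀ z ∈ t, x ≤ z := fun z hz => List.rel_of_pairwise_cons hs hz
  cases hrest : t.dropWhile (fun y => y == x) with
  | nil => simp [hrest] at hy
  | cons r rr =>
    have hrne : (r == x) = false := by
      have := List.head_dropWhile_not (fun y => y == x) (l := t) (by simp [hrest])
      simpa [hrest] using this
    have hrt : r ∈ t := by
      have hr : r ∈ t.dropWhile (fun y => y == x) := by simp [hrest]
      exact (List.dropWhile_sublist _).subset hr
    have hxr : x < r := lt_of_le_of_ne (hle r hrt) (Ne.symm (beq_eq_false_iff_ne.mp hrne))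
    have hpw : (t.dropWhile (fun y => y == x)).Pairwise (· ≤ ·) :=
      List.Pairwise.sublist (List.dropWhile_sublist _) (List.pairwise_cons.mp hs).2
    rw [hrest] at hy hpw
    rcases List.mem_cons.mp hy with h | h
    · omega
    · have : r ≤ y := List.rel_of_pairwise_cons hpw h
      omega

-- run heads are strictly increasing on a sorted list
theorem pv_pairwise_fst_pvRuns (s : List Int) (hs : s.Pairwise (· ≤ ·)) :
    ((pvRuns s).map Prod.fst).Pairwise (· < ·) := by
  induction s using pvRuns.induct with
  | case1 => simp [pvRuns]
  | case2 x t rest ih0 =>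
    have ih : (t.dropWhile (fun y => y == x)).Pairwise (· ≤ ·) →
        ((pvRuns (t.dropWhile (fun y => y == x))).map Prod.fst).Pairwise (· < ·) := ih0
    have hrest_pw : (t.dropWhile (fun y => y == x)).Pairwise (· ≤ ·) :=
      List.Pairwise.sublist (List.dropWhile_sublist _) (List.pairwise_cons.mp hs).2
    simp only [pvRuns, List.map_cons]
    refine List.pairwise_cons.mpr ⟨?_, ih hrest_pw⟩
    intro v hv
    exact pv_rest_gt x t hs v ((pv_mem_fst_pvRuns _ v).mp hv)

-- each run carries the total multiplicity of its head in the sorted list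
theorem pv_count_pvRuns (s : List Int) (hs : s.Pairwise (· ≤ ·)) :
    ∀ p ∈ pvRuns s, p.2 = (List.count p.1 s : Int) := by
  induction s using pvRuns.induct with
  | case1 => simp [pvRuns]
  | case2 x t rest ih0 =>
    have ih : (t.dropWhile (fun y => y == x)).Pairwise (· ≤ ·) →
        ∀ p ∈ pvRuns (t.dropWhile (fun y => y == x)), p.2 = (List.count p.1 (t.dropWhile (fun y => y == x)) : Int) := ih0
    have hsplit : t.takeWhile (fun y => y == x) ++ t.dropWhile (fun y => y == x) = t :=
      List.takeWhile_append_dropWhile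
    have hpre : ∀ y ∈ t.takeWhile (fun y => y == x), y = x := by
      intro y hy; simpa using List.mem_takeWhile_imp hy
    have hrest_gt := pv_rest_gt x t hs
    have hrest_pw : (t.dropWhile (fun y => y == x)).Pairwise (· ≤ ·) :=
      List.Pairwise.sublist (List.dropWhile_sublist _) (List.pairwise_cons.mp hs).2
    intro p hp
    simp only [pvRuns, List.mem_cons] at hp
    rcases hp with hp | hp
    · subst hp
      have hcpre : List.count x (t.takeWhile (fun y => y == x)) = (t.takeWhile (fun y => y == x)).length :=
        List.count_eq_length.mpr (fun b hb => (hpre b hb).symm)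
      have hcrest : List.count x (t.dropWhile (fun y => y == x)) = 0 :=
        List.count_eq_zero.mpr (fun hx => lt_irrefl x (hrest_gt x hx))
      have hct : List.count x (x :: t) = (t.takeWhile (fun y => y == x)).length + 1 := by
        rw [List.count_cons_self]
        conv_lhs => rw [← hsplit]
        rw [List.count_append, hcpre, hcrest]
      simp only [hct]
      push_cast
      ring
    · have h2 := ih hrest_pw p hp
      have hfst : p.1 ∈ t.dropWhile (fun y => y == x) :=
        (pv_mem_fst_pvRuns _ p.1).mp (List.mem_map_of_mem hp)
      have hgt : x < p.1 := hrest_gt p.1 hfst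
      have hne : p.1 ≠ x := by omega
      have hcpre : List.count p.1 (t.takeWhile (fun y => y == x)) = 0 :=
        List.count_eq_zero.mpr (fun hx => hne (hpre _ hx))
      rw [h2]
      congr 1
      have : List.count p.1 (x :: t) = List.count p.1 t := by
        rw [List.count_cons]
        simp [Ne.symm hne]
      rw [this]
      conv_rhs => rw [← hsplit]
      rw [List.count_append, hcpre, Nat.zero_add]

-- find? of a predicate with a unique satisfying element
theorem pv_find?_unique {α : Type} (l : List α) (p : α → Bool) (a : α)
    (ha : a ∈ l) (hpa : p a = true) (hu : ∀ b ∈ l, p b = true → b = a) :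
    l.find? p = some a := by
  induction l with
  | nil => simp at ha
  | cons x t ih =>
    by_cases hx : p x = true
    · rw [List.find?_cons_of_pos hx, hu x List.mem_cons_self hx]
    · rw [List.find?_cons_of_neg hx]
      have hxa : x ≠ a := fun h => hx (h ▸ hpa)
      have hat : a ∈ t := by
        rcases List.mem_cons.mp ha with h | h
        · exact absurd h.symm hxa
        · exact h
      exact ih hat (fun b hb => hu b (List.mem_cons_of_mem _ hb))

-- number of runs = number of distinct values
theorem pv_runs_length (rd : List Int) :
    (pvRuns (PySem.List.sorted rd (fun x => x) false)).length = (PySem.Set.ofList rd).length := by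
  have hs : (PySem.List.sorted rd (fun x => x) false).Pairwise (· ≤ ·) := by
    simpa using PySem.List.sorted_pairwise rd (fun x => x)
  have hnodup : ((pvRuns (PySem.List.sorted rd (fun x => x) false)).map Prod.fst).Nodup :=
    (pv_pairwise_fst_pvRuns _ hs).imp (fun h => ne_of_lt h)
  have hperm : ((pvRuns (PySem.List.sorted rd (fun x => x) false)).map Prod.fst).Perm (PySem.Set.ofList rd) := by
    rw [List.perm_ext_iff_of_nodup hnodup (PySem.Set.nodup_ofList rd)]
    intro v
    rw [pv_mem_fst_pvRuns, PySem.List.mem_sorted, PySem.Set.mem_ofList]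
  have := hperm.length_eq
  simpa using this

-- ===== VERDICT (by name: the statement is the Claim_ definition above) =====
theorem calculate_prize_spec : Claim_equal_calculate_prize := by
  intro rd _ hpre
  obtain ⟨hne, h2⟩ := hpre
  unfold Spec_calculate_prize calculate_prize calculate_prize_alt
  set s := PySem.List.sorted rd (fun x => x) false with hsdef
  have hs : s.Pairwise (· ≤ ·) := by
    simpa [hsdef] using PySem.List.sorted_pairwise rd (fun x => x)
  have hmem : ∀ v, v ∈ s ↔ v ∈ rd := by
    intro v; rw [hsdef, PySem.List.mem_sorted]
  have hlen := pv_runs_length rd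
  rw [← hsdef] at hlen
  have hsne : s ≠ [] := by
    intro h
    rw [hsdef] at h
    exact hne (Iff.mp (PySem.List.sorted_eq_nil_iff rd (fun x => x) false) h)
  simp only [hlen]
  by_cases h1 : (PySem.Set.ofList rd).length = 1
  · -- all dice equal
    simp only [h1, if_true]
    obtain ⟨v, hv⟩ := List.length_eq_one_iff.mp h1
    have hall : ∀ y ∈ rd, y = v := by
      intro y hy
      have : y ∈ PySem.Set.ofList rd := Iff.mpr (PySem.Set.mem_ofList rd y) hy
      simpa [hv] using this
    obtain ⟨z, zs, hz⟩ := List.exists_cons_of_ne_nil hne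
    obtain ⟨w, ws, hw⟩ := List.exists_cons_of_ne_nil hsne
    have hzv : z = v := hall z (by simp [hz])
    have hwv : w = v := hall w ((hmem w).mp (by simp [hw]))
    simp [hz, hw, hzv, hwv]
  · by_cases hd2 : (PySem.Set.ofList rd).length = 2
    · -- exactly two distinct values; Pre_ gives the unique count-2 value
      simp only [hd2]
      have h2' := h2 (by simpa [PySem.List.dedup_eq_ofList] using hd2)
      obtain ⟨v, hv⟩ := List.length_eq_one_iff.mp h2'
      have hvf : v ∈ (PySem.List.dedup rd).filter (fun v => rd.count v == 2) := by
        rw [hv]; simp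
      have hvrd : v ∈ rd := by
        have := (List.mem_filter.mp hvf).1
        exact Iff.mp (PySem.List.mem_dedup rd v) this
      have hvcnt : List.count v rd = 2 := by
        have := (List.mem_filter.mp hvf).2
        simpa using this
      have huniq : ∀ u, u ∈ rd → List.count u rd = 2 → u = v := by
        intro u hu hcu
        have hm : u ∈ (PySem.List.dedup rd).filter (fun v => rd.count v == 2) := by
          rw [List.mem_filter]
          exact ⟨Iff.mpr (PySem.List.mem_dedup rd u) hu, by simp [hcu]⟩
        rw [hv] at hm
        simpa using hm
      have hfA : (PySem.Set.ofList rd).find? (fun num => PySem.List.count rd num == 2) = some v := by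
        apply pv_find?_unique
        · exact Iff.mpr (PySem.Set.mem_ofList rd v) hvrd
        · simp [PySem.List.count_eq, hvcnt]
        · intro b hb hpb
          refine huniq b (Iff.mp (PySem.Set.mem_ofList rd b) hb) ?_
          simpa [PySem.List.count_eq] using hpb
      have hscount : ∀ u, List.count u s = List.count u rd := by
        intro u
        rw [hsdef]
        exact (PySem.List.sorted_perm rd (fun x => x) false).count_eq u
      have hvs : v ∈ s := (hmem v).mpr hvrd
      obtain ⟨p, hp, hpfst⟩ : ∃ p ∈ pvRuns s, p.1 = v := by
        have : v ∈ (pvRuns s).map Prod.fst := (pv_mem_fst_pvRuns s v).mpr hvs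
        obtain ⟨p, hp, h⟩ := List.mem_map.mp this
        exact ⟨p, hp, h⟩
      have hpv : p = (v, (2 : Int)) := by
        have hc := pv_count_pvRuns s hs p hp
        have hp2 : p.2 = (2 : Int) := by
          rw [hc, hpfst, hscount, hvcnt]; rfl
        cases p
        simp_all
      have hfB : (pvRuns s).find? (fun vc => vc.2 == 2) = some (v, (2 : Int)) := by
        apply pv_find?_unique
        · rw [← hpv]; exact hp
        · rfl
        · intro b hb hpb
          have hbc := pv_count_pvRuns s hs b hb
          have hb2 : b.2 = (2 : Int) := by simpa using hpb
          have hcnt : List.count b.1 rd = 2 := by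
            rw [hbc, hscount] at hb2
            exact_mod_cast hb2
          have hbfst : b.1 ∈ s :=
            (pv_mem_fst_pvRuns s b.1).mp (List.mem_map_of_mem hb)
          have hbv : b.1 = v := huniq b.1 ((hmem b.1).mp hbfst) hcnt
          cases b
          simp_all
      rw [hfA, hfB]
      norm_num
    · -- three or more distinct values: max(rd) = last of sorted
      simp only [h1, hd2, if_false]
      obtain ⟨m, hm⟩ : ∃ m, PySem.List.max? rd (fun x => x) = some m := by
        cases hmx : PySem.List.max? rd (fun x => x) with
        | none => exact absurd (Iff.mp (PySem.List.max?_eq_none_iff rd (fun x => x)) hmx) hne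
        | some m => exact ⟨m, rfl⟩
      have hmmax : ∀ y ∈ rd, y ≤ m := by
        intro y hy
        simpa using PySem.List.max?_isMax hm y hy
      have hmrd : m ∈ rd := PySem.List.max?_mem hm
      obtain ⟨g, hg⟩ : ∃ g, s.getLast? = some g := by
        cases hgl : s.getLast? with
        | none => exact absurd (List.getLast?_eq_none_iff.mp hgl) hsne
        | some g => exact ⟨g, rfl⟩
      have hgs : g ∈ s := List.mem_of_getLast? hg
      have hgmax : ∀ y ∈ s, y ≤ g := by
        intro y hy
        have hgr : s.reverse.head? = some g := by
          rw [List.head?_reverse]; exact hg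
        obtain ⟨rt, hrt⟩ : ∃ rt, s.reverse = g :: rt := by
          cases hr : s.reverse with
          | nil => rw [hr] at hgr; simp at hgr
          | cons a l =>
            rw [hr] at hgr
            simp only [List.head?_cons, Option.some.injEq] at hgr
            exact ⟨l, by rw [hgr]⟩
        have hrev : s.reverse.Pairwise (fun a b => b ≤ a) := by
          rw [List.pairwise_reverse]; exact hs
        have hyrev : y ∈ s.reverse := List.mem_reverse.mpr hy
        rw [hrt] at hyrev hrev
        rcases List.mem_cons.mp hyrev with hh | hh
        · omega
        · have := List.rel_of_pairwise_cons hrev hh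
          omega
      have hmg : m = g := by
        have ha : m ≤ g := hgmax m ((hmem m).mpr hmrd)
        have hb : g ≤ m := hmmax g ((hmem g).mp hgs)
        omega
      rw [PySem.List.pyGet?_neg_one, hg, hm, hmg]
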